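-- pv_equiv track=rewrite | github.com/Karla-Anaya/Programacion_logica_y_funcional | mpp.py | lugar
-- ===== SOURCE A (Python) =====
-- def lugar(X,Y):
-- 	if not X:
-- 		return []
-- 	if len(X):
-- 		if Y == X[0][0]:
-- 			return X[0][1]
-- 		else:
-- 			return lugar(X[1:],Y)
-- ===== SOURCE B (Python) =====
-- def lugar(X, Y):
--     return next((v for k, v in X if k == Y), [])
-- ===== Notes on version B (the rewrite author's own statement) =====
-- stated objective: idiomatic
-- what changed: Replaced tail recursion with repeated list slicing by a single next() over a generator expression (first-match lookup), no recursion and no copies.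
import Mathlib
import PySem

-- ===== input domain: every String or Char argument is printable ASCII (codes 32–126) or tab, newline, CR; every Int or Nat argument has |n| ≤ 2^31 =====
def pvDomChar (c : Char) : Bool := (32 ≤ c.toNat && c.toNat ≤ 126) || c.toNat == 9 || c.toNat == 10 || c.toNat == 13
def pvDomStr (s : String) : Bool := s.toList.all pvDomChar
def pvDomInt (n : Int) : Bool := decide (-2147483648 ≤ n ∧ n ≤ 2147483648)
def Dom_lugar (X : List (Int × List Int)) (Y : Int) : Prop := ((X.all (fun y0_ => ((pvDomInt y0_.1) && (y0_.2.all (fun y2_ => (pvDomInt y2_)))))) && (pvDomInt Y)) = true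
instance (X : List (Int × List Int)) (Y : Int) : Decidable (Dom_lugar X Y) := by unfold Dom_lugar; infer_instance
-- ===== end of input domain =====

-- B replaces A's tail-slicing recursion by a single idiomatic first-match
-- lookup (next over a generator expression); return value unchanged.

-- ===== PORT A =====
-- literal transliteration of A's recursion: empty check, head compare, recurse on tail
def lugar (X : List (Int × List Int)) (Y : Int) : List Int :=
  match X with
  | [] => []
  | p :: rest =>
    if Y == p.1 then p.2
    else lugar rest Y

-- ===== PORT B =====
-- next((v for k, v in X if k == Y), []) : first pair with matching key, default []
def lugar_alt (X : List (Int × List Int)) (Y : Int) : List Int :=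
  ((X.find? (fun p => p.1 == Y)).map Prod.snd).getD []

-- ===== PRECONDITION & SPEC =====
def Spec_lugar (X : List (Int × List Int)) (Y : Int) (out : List Int) : Prop := out = lugar_alt X Y
instance (X : List (Int × List Int)) (Y : Int) (out : List Int) : Decidable (Spec_lugar X Y out) := by unfold Spec_lugar; infer_instance

-- ===== CLAIM (what is proved, stated in full; the proofs are below) =====
def Claim_equal_lugar : Prop := ∀ (X : List (Int × List Int)) (Y : Int), Dom_lugar X Y → Spec_lugar X Y (lugar X Y)

-- ===== LEMMAS AND PROOFS =====
theorem lugar_eq_alt (X : List (Int × List Int)) (Y : Int) : lugar X Y = lugar_alt X Y := by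
  induction X with
  | nil => rfl
  | cons p rest ih =>
    simp only [lugar, lugar_alt, List.find?]
    by_cases h : Y = p.1
    · simp [h]
    · have h' : (p.1 == Y) = false := by simp [Ne.symm h]
      simp [h, h', lugar_alt] at ih ⊢
      exact ih

-- ===== VERDICT (by name: the statement is the Claim_ definition above) =====
theorem lugar_spec : Claim_equal_lugar := by
  intro X Y _
  exact lugar_eq_alt X Y
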